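-- pv_equiv track=rewrite | github.com/NathanFallet/MPSI | td4/minimumListe.py | minimumListe
-- ===== SOURCE A (Python) =====
-- def minimumListe(liste):
--     # On initialise le minimum et l'index à la première valeur de la liste
--     minimum = liste[0]
--     index = 0
--     # On parcours la liste à partir du deuxième élément
--     for i in range(1, len(liste)):
--         # Si on a un nouveau minimum
--         if liste[i] <= minimum:
--             # On remplace l'ancien minimum par le nouveau
--             minimum = liste[i]
--             index = i
--
--     # On retourne un tuple avec les deux valeurs recherchées
--     return (minimum, index)
-- ===== SOURCE B (Python) =====
-- def minimumListe(liste):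
--     # two separate passes: min() then last occurrence via reverse index search
--     minimum = min(liste)
--     index = len(liste) - 1 - liste[::-1].index(minimum)
--     return (minimum, index)
-- ===== Notes on version B (the rewrite author's own statement) =====
-- stated objective: idiomatic
-- what changed: Replaces the single interleaved index loop tracking (minimum, index) with two separate passes: a min() reduction followed by a reverse-search for the last occurrence.
import Mathlib
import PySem

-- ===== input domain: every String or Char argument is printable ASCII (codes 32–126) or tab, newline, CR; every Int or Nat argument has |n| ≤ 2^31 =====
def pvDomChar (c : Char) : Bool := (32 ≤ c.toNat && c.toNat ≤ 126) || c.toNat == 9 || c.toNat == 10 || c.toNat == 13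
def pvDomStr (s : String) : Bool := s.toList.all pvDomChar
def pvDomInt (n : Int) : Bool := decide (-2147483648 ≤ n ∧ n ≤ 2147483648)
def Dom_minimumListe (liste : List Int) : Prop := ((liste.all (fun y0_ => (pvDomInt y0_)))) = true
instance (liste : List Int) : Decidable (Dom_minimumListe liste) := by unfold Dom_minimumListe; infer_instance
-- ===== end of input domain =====

-- B replaces A's single interleaved index loop with two separate passes (min() reduction, then a reverse search for its last occurrence); same cost, more idiomatic.


-- ===== PORT A =====
-- literal port of A: minimum = liste[0]; index = 0; for i in range(1, len(liste)): if liste[i] <= minimum: minimum, index = liste[i], i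
def minimumListe (liste : List Int) : Int × Int :=
  match PySem.List.pyGet? liste 0 with
  | none => (0, 0)   -- liste[0] raises IndexError on []; excluded by Pre_
  | some m0 =>
    (PySem.List.pyRange 1 (liste.length : Int) 1).foldl
      (fun (st : Int × Int) i =>
        if PySem.List.pyGetD liste i 0 ≤ st.1 then (PySem.List.pyGetD liste i 0, i) else st)
      (m0, 0)

-- ===== PORT B =====
-- literal port of B: minimum = min(liste); index = len(liste) - 1 - liste[::-1].index(minimum)
def minimumListe_alt (liste : List Int) : Int × Int :=
  match PySem.List.min? liste (fun x => x) with
  | none => (0, 0)   -- min([]) raises ValueError on []; excluded by Pre_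
  | some m =>
    match PySem.List.index? ((PySem.List.slice? liste none none (-1)).getD []) m with
    | some j => (m, (liste.length : Int) - 1 - (j : Int))
    | none => (m, 0) -- unreachable: the minimum is a member of the list

-- ===== PRECONDITION & SPEC =====
-- Pre_ excludes exactly the empty list, on which A's liste[0] raises IndexError (and B's min([]) raises ValueError).
def Pre_minimumListe (liste : List Int) : Prop := liste ≠ []
instance (liste : List Int) : Decidable (Pre_minimumListe liste) := by unfold Pre_minimumListe; infer_instance
def pvWitness_minimumListe : List Int := [3, 1, 2, 1]

def Spec_minimumListe (liste : List Int) (out : Int × Int) : Prop := out = minimumListe_alt liste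
instance (liste : List Int) (out : Int × Int) : Decidable (Spec_minimumListe liste out) := by unfold Spec_minimumListe; infer_instance

-- ===== CLAIM (what is proved, stated in full; the proofs are below) =====
def Claim_equal_minimumListe : Prop := ∀ (liste : List Int), Dom_minimumListe liste → Pre_minimumListe liste → Spec_minimumListe liste (minimumListe liste)

-- ===== LEMMAS AND PROOFS =====

-- A's loop on l ++ [x] is the loop on l followed by one more comparison at index l.length
lemma A_append (l : List Int) (x : Int) (h : l ≠ []) :
    minimumListe (l ++ [x]) =
      if x ≤ (minimumListe l).1 then (x, (l.length : Int)) else minimumListe l := by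
  obtain ⟨h0, t, rfl⟩ := List.exists_cons_of_ne_nil h
  have hget : PySem.List.pyGet? ((h0 :: t) ++ [x]) 0 = some h0 := by
    rw [List.cons_append]
    simp [pysem]
  have hget1 : PySem.List.pyGet? (h0 :: t) 0 = some h0 := by
    simp [pysem]
  have hlen : (((h0 :: t) ++ [x]).length : Int) = ((h0 :: t).length : Int) + 1 := by simp
  have hrange : PySem.List.pyRange 1 (((h0 :: t) ++ [x]).length : Int) 1
      = PySem.List.pyRange 1 ((h0 :: t).length : Int) 1 ++ [((h0 :: t).length : Int)] := by
    rw [hlen]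
    exact PySem.List.pyRange_one_succ_right (by simp)
  have hcongr : ∀ (acc : Int × Int), ∀ i ∈ PySem.List.pyRange 1 ((h0 :: t).length : Int) 1,
      (fun (st : Int × Int) i =>
        if PySem.List.pyGetD ((h0 :: t) ++ [x]) i 0 ≤ st.1 then (PySem.List.pyGetD ((h0 :: t) ++ [x]) i 0, i) else st) acc i
      = (fun (st : Int × Int) i =>
        if PySem.List.pyGetD (h0 :: t) i 0 ≤ st.1 then (PySem.List.pyGetD (h0 :: t) i 0, i) else st) acc i := by
    intro acc i hi
    dsimp only
    obtain ⟨h1, h2⟩ := PySem.List.mem_pyRange_one.mp hi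
    have h0i : (0:Int) ≤ i := by omega
    have hilt : i.toNat < (h0 :: t).length := by omega
    rw [PySem.List.pyGetD_of_nonneg _ _ h0i, PySem.List.pyGetD_of_nonneg _ _ h0i,
      List.getD_append _ _ _ _ hilt]
  have hgetlast : PySem.List.pyGetD ((h0 :: t) ++ [x]) ((h0 :: t).length : Int) 0 = x := by
    rw [PySem.List.pyGetD_natCast]
    simp [List.getD]
  simp only [minimumListe, hget, hget1, hrange, List.foldl_append]
  rw [PySem.List.foldl_congr_mem _ _ _ _ hcongr]
  simp only [List.foldl_cons, List.foldl_nil, hgetlast]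

-- B on l ++ [x] satisfies the same recurrence
lemma B_append (l : List Int) (x : Int) (h : l ≠ []) :
    minimumListe_alt (l ++ [x]) =
      if x ≤ (minimumListe_alt l).1 then (x, (l.length : Int)) else minimumListe_alt l := by
  obtain ⟨h0, t, rfl⟩ := List.exists_cons_of_ne_nil h
  have hmin : PySem.List.min? (h0 :: t) (fun x => x) = some (t.foldl min h0) :=
    PySem.List.min?_id_cons h0 t
  have hmin2 : PySem.List.min? ((h0 :: t) ++ [x]) (fun x => x) = some (min (t.foldl min h0) x) := by
    rw [List.cons_append, PySem.List.min?_id_cons]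
    simp [List.foldl_append]
  have hmem : t.foldl min h0 ∈ h0 :: t := PySem.List.min?_mem hmin
  have hrev : t.foldl min h0 ∈ (h0 :: t).reverse := List.mem_reverse.mpr hmem
  have hrevapp : ((h0 :: t) ++ [x]).reverse = x :: (h0 :: t).reverse := by simp
  cases hidx : PySem.List.index? (h0 :: t).reverse (t.foldl min h0) with
  | none => exact absurd hrev ((PySem.List.index?_eq_none_iff _ _).mp hidx)
  | some j =>
    by_cases hle : x ≤ t.foldl min h0
    · have hmx : min (t.foldl min h0) x = x := min_eq_right hle
      simp only [minimumListe_alt, hmin, hmin2, hmx, PySem.List.slice?_none_none_neg_one,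
        Option.getD_some, hrevapp, hidx, PySem.List.index?_cons_self]
      simp only [hle, if_true]
      simp
    · have hmx : min (t.foldl min h0) x = t.foldl min h0 := min_eq_left (le_of_not_ge hle)
      have hne : x ≠ t.foldl min h0 := fun hxM => hle (le_of_eq hxM)
      simp only [minimumListe_alt, hmin, hmin2, hmx, PySem.List.slice?_none_none_neg_one,
        Option.getD_some, hrevapp, PySem.List.index?_cons_of_ne _ hne, hidx, Option.map_some]
      simp only [hle, if_false]
      have hl1 : ((h0 :: t ++ [x]).length : Int) = ((h0 :: t).length : Int) + 1 := by simp
      rw [hl1]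
      simp only [Prod.mk.injEq, true_and]
      push_cast
      ring

lemma AB_singleton (x : Int) : minimumListe [x] = minimumListe_alt [x] := by
  simp [minimumListe, minimumListe_alt, pysem]

-- ===== VERDICT (by name: the statement is the Claim_ definition above) =====
theorem minimumListe_spec : Claim_equal_minimumListe := by
  intro liste hdom hpre
  clear hdom
  unfold Spec_minimumListe
  induction liste using List.reverseRecOn with
  | nil => exact absurd rfl hpre
  | append_singleton l x ih =>
    rcases eq_or_ne l [] with rfl | hl
    · simpa using AB_singleton x
    · rw [A_append l x hl, B_append l x hl, ih hl]
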